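-- pv_equiv track=rewrite | github.com/SirineAchour/Nim | nim.py | set_child_value
-- ===== SOURCE A (Python) =====
-- def set_child_value(list_, current_value, deduction):
--     result_list = []
--     is_already_split = True
--     for value in list_:
--         if value == current_value and is_already_split:
--             result_list.append(current_value - deduction)
--             result_list.append(deduction)
--             is_already_split = False
--         else:
--             result_list.append(value)
--     # result_list.sort(reverse=True)  # Uncomment for sorted list
--     return result_list
-- ===== SOURCE B (Python) =====
-- def set_child_value(list_, current_value, deduction):
--     # find the index of the first element == current_value, then splice
--     i = 0
--     found = False
--     for value in list_:
--         if value == current_value: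
--             found = True
--             break
--         i += 1
--     if not found:
--         return list(list_)
--     return list_[:i] + [current_value - deduction, deduction] + list_[i+1:]
-- ===== Notes on version B (the rewrite author's own statement) =====
-- stated objective: alternative
-- what changed: Replaces A's flag-guarded accumulating pass (append element-by-element, splitting the first match when a boolean flag is still set) with a search-then-splice construction: an explicit scan finds the index of the first matching element, and the result is built by slice concatenation list_[:i] + [current_value - deduction, deduction] + list_[i+1:].
import Mathlib
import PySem

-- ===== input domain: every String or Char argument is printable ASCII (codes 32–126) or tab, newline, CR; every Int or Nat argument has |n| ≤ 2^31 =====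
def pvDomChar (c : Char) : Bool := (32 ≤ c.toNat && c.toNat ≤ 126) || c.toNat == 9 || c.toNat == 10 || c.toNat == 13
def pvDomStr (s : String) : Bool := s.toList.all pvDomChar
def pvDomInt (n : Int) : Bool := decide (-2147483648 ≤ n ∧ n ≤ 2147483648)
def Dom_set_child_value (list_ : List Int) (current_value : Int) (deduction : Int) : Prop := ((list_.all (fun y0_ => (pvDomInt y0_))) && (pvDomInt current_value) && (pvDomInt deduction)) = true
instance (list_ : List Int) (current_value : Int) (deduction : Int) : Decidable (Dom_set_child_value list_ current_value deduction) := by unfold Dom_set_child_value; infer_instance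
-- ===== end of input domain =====

-- B replaces A's flag-guarded accumulating pass with a search-then-splice construction (alternative, same cost).


-- ===== PORT A =====
-- loop with state (result_list, is_already_split)
def set_child_value (list_ : List Int) (current_value : Int) (deduction : Int) : List Int :=
  (list_.foldl
    (fun (s : List Int × Bool) value =>
      if value = current_value ∧ s.2 = true then
        (s.1 ++ [current_value - deduction, deduction], false)
      else
        (s.1 ++ [value], s.2))
    ([], true)).1

-- ===== PORT B =====
-- index of the first element equal to cv (B's explicit scan-with-break loop)
def scvFirstIdx (l : List Int) (cv : Int) : Option Nat :=
  match l with
  | [] => none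
  | x :: xs => if x = cv then some 0 else (scvFirstIdx xs cv).map (· + 1)

def set_child_value_alt (list_ : List Int) (current_value : Int) (deduction : Int) : List Int :=
  match scvFirstIdx list_ current_value with
  | none => list_
  | some i =>
      PySem.List.slice list_ none (some (i : Int)) ++ [current_value - deduction, deduction] ++
        PySem.List.slice list_ (some ((i : Int) + 1)) none

-- ===== PRECONDITION & SPEC =====
def Spec_set_child_value (list_ : List Int) (current_value : Int) (deduction : Int) (out : List Int) : Prop := out = set_child_value_alt list_ current_value deduction
instance (list_ : List Int) (current_value : Int) (deduction : Int) (out : List Int) : Decidable (Spec_set_child_value list_ current_value deduction out) := by unfold Spec_set_child_value; infer_instance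

-- ===== CLAIM (what is proved, stated in full; the proofs are below) =====
def Claim_equal_set_child_value : Prop := ∀ (list_ : List Int) (current_value : Int) (deduction : Int), Dom_set_child_value list_ current_value deduction → Spec_set_child_value list_ current_value deduction (set_child_value list_ current_value deduction)

-- ===== LEMMAS AND PROOFS =====

-- once the flag is false, A's loop just appends the remaining elements
theorem scv_loop_false (cv d : Int) (l acc : List Int) :
    (l.foldl
      (fun (s : List Int × Bool) value =>
        if value = cv ∧ s.2 = true then (s.1 ++ [cv - d, d], false) else (s.1 ++ [value], s.2))
      (acc, false)) = (acc ++ l, false) := by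
  induction l generalizing acc with
  | nil => simp
  | cons x xs ih => simp [ih]

-- with the flag still true, A's loop computes B's splice after the accumulator
theorem scv_loop_true (cv d : Int) (l acc : List Int) :
    (l.foldl
      (fun (s : List Int × Bool) value =>
        if value = cv ∧ s.2 = true then (s.1 ++ [cv - d, d], false) else (s.1 ++ [value], s.2))
      (acc, true)).1
    = acc ++ (match scvFirstIdx l cv with
      | none => l
      | some i => l.take i ++ [cv - d, d] ++ l.drop (i + 1)) := by
  induction l generalizing acc with
  | nil => simp [scvFirstIdx]
  | cons x xs ih =>
    by_cases hx : x = cv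
    · simp [hx, scvFirstIdx, scv_loop_false]
    · simp only [List.foldl_cons]
      rw [if_neg (by simp [hx]), ih]
      simp only [scvFirstIdx, if_neg hx]
      cases h : scvFirstIdx xs cv with
      | none => simp
      | some i => simp

-- ===== VERDICT (by name: the statement is the Claim_ definition above) =====
theorem set_child_value_spec : Claim_equal_set_child_value := by
  intro l cv d _
  unfold Spec_set_child_value set_child_value set_child_value_alt
  rw [scv_loop_true]
  cases h : scvFirstIdx l cv with
  | none => simp
  | some i =>
    have h1 : PySem.List.slice l none (some (i : Int)) = l.take i :=
      PySem.List.slice_to_natCast l i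
    have h2 : PySem.List.slice l (some ((i : Int) + 1)) none = l.drop (i + 1) := by
      rw [show ((i : Int) + 1) = ((i + 1 : Nat) : Int) from by push_cast; ring]
      exact PySem.List.slice_from_natCast l (i + 1)
    simp [h1, h2]
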